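-- pv_equiv track=rewrite | github.com/IuliaRadulescu/DynamicCommunityDetection | interpretAlluvial.py | determineDynamicCommunitiesDFS
-- ===== SOURCE A (Python) =====
-- def determineDynamicCommunitiesDFS(alluvialData):
--
--     # determine leafs
--
--     nonLeaves = list(set(alluvialData.keys()))
--
--     alreadyParsedGlobal = set()
--
--     stack = []
--     dynamicCommunities = []
--
--     for communityId in alluvialData:
--
--         if (communityId not in alluvialData) or (communityId in alreadyParsedGlobal):
--             continue
--
--         stack.append((communityId, [communityId]))
--
--         while len(stack) > 0:
--
--             (communityId, path) = stack.pop()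
--
--             if (communityId not in alreadyParsedGlobal) and (communityId not in nonLeaves):
--                 dynamicCommunities.append(path)
--
--             if (communityId not in alluvialData) or (communityId in alreadyParsedGlobal):
--                 continue
--
--             alreadyParsedGlobal.add(communityId)
--             adjacentCommunities = alluvialData[communityId]
--
--             for adjCommunity in adjacentCommunities:
--                 stack.append((adjCommunity, path + [adjCommunity]))
--
--     return dynamicCommunities
-- ===== SOURCE B (Python) =====
-- def determineDynamicCommunitiesDFS(alluvialData):
--     alreadyParsedGlobal = set()
--     dynamicCommunities = []
--
--     def dfs(communityId, path):
--         if (communityId not in alreadyParsedGlobal) and (communityId not in alluvialData):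
--             dynamicCommunities.append(path)
--         if (communityId not in alluvialData) or (communityId in alreadyParsedGlobal):
--             return
--         alreadyParsedGlobal.add(communityId)
--         for adjCommunity in reversed(alluvialData[communityId]):
--             dfs(adjCommunity, path + [adjCommunity])
--
--     for communityId in alluvialData:
--         if communityId in alreadyParsedGlobal:
--             continue
--         dfs(communityId, [communityId])
--
--     return dynamicCommunities
-- ===== Notes on version B (the rewrite author's own statement) =====
-- stated objective: faster
-- what changed: Replaces the explicit LIFO stack of (node, path) pairs and the precomputed nonLeaves list with a recursive DFS helper that recurses over each node's adjacency in reversed order (matching the stack's pop order); the leaf test becomes an O(1) dict-membership check instead of A's linear scan of the nonLeaves list at every popped node.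
import Mathlib
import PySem

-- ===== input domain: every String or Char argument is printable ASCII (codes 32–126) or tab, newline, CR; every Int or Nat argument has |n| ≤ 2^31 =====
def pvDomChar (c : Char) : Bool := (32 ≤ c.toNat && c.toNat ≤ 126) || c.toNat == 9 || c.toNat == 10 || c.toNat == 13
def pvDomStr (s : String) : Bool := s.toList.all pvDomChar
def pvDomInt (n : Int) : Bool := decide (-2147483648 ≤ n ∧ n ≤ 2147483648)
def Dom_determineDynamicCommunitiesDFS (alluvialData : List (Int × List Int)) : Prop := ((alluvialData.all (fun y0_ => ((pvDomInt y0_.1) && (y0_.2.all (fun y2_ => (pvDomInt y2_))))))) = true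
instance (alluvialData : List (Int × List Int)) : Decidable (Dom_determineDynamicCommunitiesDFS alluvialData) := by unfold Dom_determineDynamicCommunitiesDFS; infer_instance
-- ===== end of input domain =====

-- B replaces A's explicit LIFO stack of (node, path) pairs with a recursive DFS helper that
-- recurses over each node's adjacency in reversed order; the leaf test becomes a dict-membership
-- check instead of A's linear scan of the nonLeaves list (measurably faster in a timing run).

-- ===== PORT A =====
-- dict membership 'c in alluvialData' and lookup 'alluvialData[c]' on the association list
-- (first match; exact for the duplicate-free key lists that represent a Python dict).
def adContains (ad : List (Int × List Int)) (c : Int) : Bool := ad.any (fun kv => kv.1 == c)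

def adGet (ad : List (Int × List Int)) (c : Int) : List Int :=
  match ad.find? (fun kv => kv.1 == c) with
  | some kv => kv.2
  | none => []

-- nonLeaves = list(set(alluvialData.keys())); A only takes membership in it, which is hash-order independent.
def nonLeavesOf (ad : List (Int × List Int)) : PySem.Set Int := PySem.Set.ofList (ad.map (·.1))

-- termination measure for A's while loop: number of distinct keys not yet parsed
def uKeys (ad : List (Int × List Int)) (parsed : PySem.Set Int) : Nat :=
  ((PySem.List.dedup (ad.map (·.1))).filter (fun k => !(PySem.Set.contains parsed k))).length

-- the three lemmas below are above the ports only because loopA's decreasing_by cites uKeys_add_lt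
lemma filterLenLe {α : Type} (p q : α → Bool) (l : List α)
    (h : ∀ x ∈ l, q x = true → p x = true) : (l.filter q).length ≤ (l.filter p).length := by
  simp only [← List.countP_eq_length_filter]
  exact List.countP_mono_left h

lemma filterLenLt {α : Type} (p q : α → Bool) :
    ∀ (l : List α), (∀ x ∈ l, q x = true → p x = true) →
      ∀ c ∈ l, p c = true → q c = false → (l.filter q).length < (l.filter p).length := by
  intro l
  induction l with
  | nil => intro _ c hc; simp at hc
  | cons a t ih =>
    intro hmono c hc hp hq
    have hmt : ∀ x ∈ t, q x = true → p x = true := fun x hx => hmono x (List.mem_cons_of_mem _ hx)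
    rcases List.mem_cons.mp hc with rfl | hc
    · have hle := filterLenLe p q t hmt
      simp [List.filter, hp, hq]; omega
    · have := ih hmt c hc hp hq
      by_cases hqa : q a = true
      · have hpa := hmono a List.mem_cons_self hqa
        simp [List.filter, hpa, hqa]; omega
      · simp at hqa
        cases hpa : p a <;> simp [List.filter, hpa, hqa] <;> omega

lemma adContains_mem_keys {ad : List (Int × List Int)} {c : Int} (hk : adContains ad c = true) :
    c ∈ ad.map (·.1) := by
  unfold adContains at hk
  rw [List.any_eq_true] at hk
  obtain ⟨kv, hmem, hbeq⟩ := hk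
  exact List.mem_map.mpr ⟨kv, hmem, by simpa using hbeq⟩

lemma uKeys_add_lt (ad : List (Int × List Int)) (parsed : PySem.Set Int) (c : Int)
    (hk : adContains ad c = true) (hp : PySem.Set.contains parsed c = false) :
    uKeys ad (PySem.Set.add parsed c) < uKeys ad parsed := by
  unfold uKeys
  apply filterLenLt
  · intro x _ hq
    simp only [Bool.not_eq_true'] at hq ⊢
    cases hpx : PySem.Set.contains parsed x
    · rfl
    · have hmem : x ∈ PySem.Set.add parsed c :=
        (PySem.Set.mem_add _ _ _).mpr (Or.inl ((PySem.Set.contains_iff _ _).mp hpx))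
      have := (PySem.Set.contains_iff _ _).mpr hmem
      rw [this] at hq; cases hq
  · show c ∈ PySem.List.dedup (ad.map (·.1))
    rw [PySem.List.dedup_eq_ofList, PySem.Set.mem_ofList]
    exact adContains_mem_keys hk
  · rw [hp]; rfl
  · have hmem : c ∈ PySem.Set.add parsed c := (PySem.Set.mem_add _ _ _).mpr (Or.inr rfl)
    rw [(PySem.Set.contains_iff _ _).mpr hmem]; rfl

-- A's while loop, stack top at the head; 'stack.append' inside the for-loop is the foldl of a push.
def loopA (ad : List (Int × List Int)) (nonLeaves : PySem.Set Int) (parsed : PySem.Set Int)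
    (stack : List (Int × List Int)) (acc : List (List Int)) : PySem.Set Int × List (List Int) :=
  match stack with
  | [] => (parsed, acc)
  | (c, path) :: rest =>
    let acc' := if !(PySem.Set.contains parsed c) && !(PySem.Set.contains nonLeaves c)
                then acc ++ [path] else acc
    if !(adContains ad c) || PySem.Set.contains parsed c then
      loopA ad nonLeaves parsed rest acc'
    else
      loopA ad nonLeaves (PySem.Set.add parsed c)
        ((adGet ad c).foldl (fun st a => (a, path ++ [a]) :: st) rest) acc'
termination_by (uKeys ad parsed, stack.length)
decreasing_by
  · exact Prod.Lex.right _ (Nat.lt_succ_self _)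
  · apply Prod.Lex.left
    apply uKeys_add_lt
    · simp at *; tauto
    · simp at *; tauto

def determineDynamicCommunitiesDFS (alluvialData : List (Int × List Int)) : List (List Int) :=
  (alluvialData.foldl
    (fun (st : PySem.Set Int × List (List Int)) kv =>
      if !(adContains alluvialData kv.1) || PySem.Set.contains st.1 kv.1 then st
      else loopA alluvialData (nonLeavesOf alluvialData) st.1 [(kv.1, [kv.1])] st.2)
    (PySem.Set.empty, [])).2

-- ===== PORT B =====
-- the recursive dfs helper of Source B; Python's unbounded recursion is encoded with a fuel that is
-- one more than the key count (each recursive descent permanently parses one fresh key, so the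
-- fuel-0 branch is never reached — that is what loopA_dfsB below establishes).
def dfsB (ad : List (Int × List Int)) : Nat → Int → List Int → PySem.Set Int → List (List Int) →
    PySem.Set Int × List (List Int)
  | 0, _, _, parsed, acc => (parsed, acc)
  | fuel + 1, c, path, parsed, acc =>
    let acc' := if !(PySem.Set.contains parsed c) && !(adContains ad c)
                then acc ++ [path] else acc
    if !(adContains ad c) || PySem.Set.contains parsed c then (parsed, acc')
    else
      ((adGet ad c).reverse).foldl
        (fun st a => dfsB ad fuel a (path ++ [a]) st.1 st.2)
        (PySem.Set.add parsed c, acc')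

def determineDynamicCommunitiesDFS_alt (alluvialData : List (Int × List Int)) : List (List Int) :=
  (alluvialData.foldl
    (fun (st : PySem.Set Int × List (List Int)) kv =>
      if PySem.Set.contains st.1 kv.1 then st
      else dfsB alluvialData (alluvialData.length + 1) kv.1 [kv.1] st.1 st.2)
    (PySem.Set.empty, [])).2

-- ===== PRECONDITION & SPEC =====
def Spec_determineDynamicCommunitiesDFS (alluvialData : List (Int × List Int)) (out : List (List Int)) : Prop := out = determineDynamicCommunitiesDFS_alt alluvialData
instance (alluvialData : List (Int × List Int)) (out : List (List Int)) : Decidable (Spec_determineDynamicCommunitiesDFS alluvialData out) := by unfold Spec_determineDynamicCommunitiesDFS; infer_instance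

-- ===== CLAIM (what is proved, stated in full; the proofs are below) =====
def Claim_equal_determineDynamicCommunitiesDFS : Prop := ∀ (alluvialData : List (Int × List Int)), Dom_determineDynamicCommunitiesDFS alluvialData → Spec_determineDynamicCommunitiesDFS alluvialData (determineDynamicCommunitiesDFS alluvialData)

-- ===== LEMMAS AND PROOFS =====

lemma contains_nonLeaves (ad : List (Int × List Int)) (c : Int) :
    PySem.Set.contains (nonLeavesOf ad) c = adContains ad c := by
  cases h : adContains ad c
  · rw [← Bool.not_eq_true, PySem.Set.contains_iff, nonLeavesOf, PySem.Set.mem_ofList]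
    intro hmem
    obtain ⟨kv, hkv, hfst⟩ := List.mem_map.mp hmem
    have : adContains ad c = true := List.any_eq_true.mpr ⟨kv, hkv, by simp [hfst]⟩
    rw [this] at h; cases h
  · rw [(PySem.Set.contains_iff _ _).mpr]
    rw [nonLeavesOf, PySem.Set.mem_ofList]
    exact adContains_mem_keys h

lemma uKeys_le_of_subset (ad : List (Int × List Int)) (p q : PySem.Set Int)
    (h : ∀ x, PySem.Set.contains p x = true → PySem.Set.contains q x = true) :
    uKeys ad q ≤ uKeys ad p := by
  unfold uKeys
  apply filterLenLe
  intro x _ hq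
  simp only [Bool.not_eq_true'] at hq ⊢
  cases hpx : PySem.Set.contains p x
  · rfl
  · have := h x hpx
    rw [this] at hq; cases hq

lemma uKeys_le_len (ad : List (Int × List Int)) (parsed : PySem.Set Int) :
    uKeys ad parsed ≤ ad.length := by
  unfold uKeys
  calc _ ≤ (PySem.List.dedup (ad.map (·.1))).length := List.length_filter_le _ _
    _ ≤ (ad.map (·.1)).length := by rw [PySem.List.dedup_eq_ofList]; exact PySem.Set.length_ofList_le _
    _ = ad.length := by simp

lemma dfsB_mono (ad : List (Int × List Int)) :
    ∀ (f : Nat) (c : Int) (path : List Int) (parsed : PySem.Set Int) (acc : List (List Int)) (x : Int),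
      PySem.Set.contains parsed x = true →
      PySem.Set.contains (dfsB ad f c path parsed acc).1 x = true := by
  intro f
  induction f with
  | zero => intro c path parsed acc x hx; simpa [dfsB] using hx
  | succ f ih =>
    intro c path parsed acc x hx
    rw [dfsB]
    split
    · exact hx
    · have hadd : PySem.Set.contains (PySem.Set.add parsed c) x = true :=
        (PySem.Set.contains_iff _ _).mpr
          ((PySem.Set.mem_add _ _ _).mpr (Or.inl ((PySem.Set.contains_iff _ _).mp hx)))
      generalize (adGet ad c).reverse = l
      suffices h : ∀ (l : List Int) (st : PySem.Set Int × List (List Int)),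
          PySem.Set.contains st.1 x = true →
          PySem.Set.contains (l.foldl (fun st a => dfsB ad f a (path ++ [a]) st.1 st.2) st).1 x = true by
        exact h l _ hadd
      intro l
      induction l with
      | nil => intro st h; exact h
      | cons a t iht =>
        intro st h
        simp only [List.foldl_cons]
        exact iht _ (ih a (path ++ [a]) st.1 st.2 x h)

lemma loopA_nil (ad : List (Int × List Int)) (nl parsed : PySem.Set Int) (acc : List (List Int)) :
    loopA ad nl parsed [] acc = (parsed, acc) := by
  rw [loopA]

lemma loopA_cons (ad : List (Int × List Int)) (nl parsed : PySem.Set Int) (c : Int)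
    (path : List Int) (rest : List (Int × List Int)) (acc : List (List Int)) :
    loopA ad nl parsed ((c, path) :: rest) acc =
      (let acc' := if !(PySem.Set.contains parsed c) && !(PySem.Set.contains nl c)
                   then acc ++ [path] else acc
       if !(adContains ad c) || PySem.Set.contains parsed c then
         loopA ad nl parsed rest acc'
       else
         loopA ad nl (PySem.Set.add parsed c)
           ((adGet ad c).foldl (fun st a => (a, path ++ [a]) :: st) rest) acc') := by
  rw [loopA]

lemma push_foldl (l : List Int) (path : List Int) (rest : List (Int × List Int)) :
    l.foldl (fun st a => (a, path ++ [a]) :: st) rest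
      = (l.reverse.map (fun a => (a, path ++ [a]))) ++ rest := by
  induction l generalizing rest with
  | nil => rfl
  | cons a t ih => simp [List.foldl_cons, ih]

lemma uKeys_dfsB_le (ad : List (Int × List Int)) (f : Nat) (c : Int) (path : List Int)
    (parsed : PySem.Set Int) (acc : List (List Int)) :
    uKeys ad (dfsB ad f c path parsed acc).1 ≤ uKeys ad parsed :=
  uKeys_le_of_subset ad parsed _ (fun x hx => dfsB_mono ad f c path parsed acc x hx)

lemma loopA_fold (ad : List (Int × List Int)) (f : Nat)
    (hdfs : ∀ (c : Int) (path : List Int) (parsed : PySem.Set Int) (acc : List (List Int))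
        (rest : List (Int × List Int)), uKeys ad parsed < f →
      loopA ad (nonLeavesOf ad) parsed ((c, path) :: rest) acc
        = (fun r => loopA ad (nonLeavesOf ad) r.1 rest r.2) (dfsB ad f c path parsed acc)) :
    ∀ (l : List Int) (path : List Int) (parsed : PySem.Set Int) (acc : List (List Int))
      (rest : List (Int × List Int)), uKeys ad parsed < f →
      loopA ad (nonLeavesOf ad) parsed ((l.map (fun a => (a, path ++ [a]))) ++ rest) acc
        = (fun r => loopA ad (nonLeavesOf ad) r.1 rest r.2)
            (l.foldl (fun st a => dfsB ad f a (path ++ [a]) st.1 st.2) (parsed, acc)) := by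
  intro l
  induction l with
  | nil => intro path parsed acc rest _; rfl
  | cons a t ih =>
    intro path parsed acc rest hu
    simp only [List.map_cons, List.cons_append, List.foldl_cons]
    rw [hdfs a (path ++ [a]) parsed acc _ hu]
    exact ih path _ _ rest (lt_of_le_of_lt (uKeys_dfsB_le ad f a (path ++ [a]) parsed acc) hu)

-- the heart of the proof: popping one stack entry and draining its whole DFS subtree equals
-- one recursive dfs call of B, provided the fuel exceeds the number of unparsed keys
lemma loopA_dfsB (ad : List (Int × List Int)) :
    ∀ (f : Nat) (c : Int) (path : List Int) (parsed : PySem.Set Int) (acc : List (List Int))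
      (rest : List (Int × List Int)), uKeys ad parsed < f →
      loopA ad (nonLeavesOf ad) parsed ((c, path) :: rest) acc
        = (fun r => loopA ad (nonLeavesOf ad) r.1 rest r.2) (dfsB ad f c path parsed acc) := by
  intro f
  induction f with
  | zero => intro c path parsed acc rest hu; omega
  | succ f ih =>
    intro c path parsed acc rest hu
    rw [loopA_cons, dfsB]
    simp only [contains_nonLeaves]
    split
    · rfl
    · rename_i hcond
      rw [push_foldl]
      have hcond' : adContains ad c = true ∧ PySem.Set.contains parsed c = false := by
        constructor
        · cases h : adContains ad c
          · rw [h] at hcond; simp at hcond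
          · rfl
        · cases h : PySem.Set.contains parsed c
          · rfl
          · rw [h] at hcond; simp at hcond
      have hlt : uKeys ad (PySem.Set.add parsed c) < f :=
        lt_of_lt_of_le (uKeys_add_lt ad parsed c hcond'.1 hcond'.2) (Nat.lt_succ_iff.mp hu)
      exact loopA_fold ad f ih (adGet ad c).reverse path (PySem.Set.add parsed c) _ rest hlt

-- ===== VERDICT (by name: the statement is the Claim_ definition above) =====
theorem determineDynamicCommunitiesDFS_spec : Claim_equal_determineDynamicCommunitiesDFS := by
  intro ad _
  unfold Spec_determineDynamicCommunitiesDFS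
  unfold determineDynamicCommunitiesDFS determineDynamicCommunitiesDFS_alt
  congr 1
  apply PySem.List.foldl_congr_mem'
  intro kv hkv st
  have hk : adContains ad kv.1 = true := List.any_eq_true.mpr ⟨kv, hkv, by simp⟩
  rw [hk]
  simp only [Bool.not_true, Bool.false_or]
  cases hc : PySem.Set.contains st.1 kv.1
  · simp only [if_neg Bool.false_ne_true]
    have hu : uKeys ad st.1 < ad.length + 1 := Nat.lt_succ_of_le (uKeys_le_len ad st.1)
    rw [loopA_dfsB ad (ad.length + 1) kv.1 [kv.1] st.1 st.2 [] hu]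
    simp only []
    rw [loopA_nil]
  · simp
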